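-- pv_equiv track=rewrite | github.com/s-yukisato/atcoder | DFS/fjs.py | f
-- ===== SOURCE A (Python) =====
-- def f(li):
--     old_list = li
--     while len(old_list) != 1:
--         new_list = []
--         for i in range(len(old_list) - 1):
--             new_list.append((old_list[i] + old_list[i + 1]) % 101)
--         else:
--             old_list = new_list[:]
--     return old_list[0]
-- ===== SOURCE B (Python) =====
-- def f(li):
--     n = len(li)
--     if n == 1:
--         return li[0]
--     total = 0
--     c = 1  # exact binomial C(n-1, k)
--     for k, x in enumerate(li):
--         total += c * x
--         c = c * (n - 1 - k) // (k + 1)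
--     return total % 101
-- ===== Notes on version B (the rewrite author's own statement) =====
-- stated objective: faster
-- what changed: Instead of repeatedly rebuilding shorter lists of adjacent sums mod 101 (n-1 quadratic passes), B computes the answer in one pass as the binomial-weighted sum sum C(n-1,k)*li[k] mod 101, maintaining the exact binomial coefficient by the multiplicative recurrence c = c*(n-1-k)//(k+1).
-- outside the precondition, e.g. on f([]): A does not finish within the time limit, B returns 0
import Mathlib
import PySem

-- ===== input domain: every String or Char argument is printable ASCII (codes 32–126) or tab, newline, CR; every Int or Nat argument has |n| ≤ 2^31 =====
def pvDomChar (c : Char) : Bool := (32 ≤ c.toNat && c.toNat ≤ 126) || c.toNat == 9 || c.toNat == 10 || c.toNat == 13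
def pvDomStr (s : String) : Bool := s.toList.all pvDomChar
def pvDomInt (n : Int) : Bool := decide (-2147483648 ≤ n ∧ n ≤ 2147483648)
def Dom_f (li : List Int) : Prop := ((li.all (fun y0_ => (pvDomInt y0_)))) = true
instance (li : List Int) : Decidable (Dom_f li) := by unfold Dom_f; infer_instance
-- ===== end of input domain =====

-- B replaces A's quadratic cascade of adjacent-sum-mod-101 passes by one pass computing
-- the binomial-weighted sum of the input mod 101 (objective: faster).

-- ===== PORT A =====
-- one pass of A's inner for-loop: new_list built by appending (old[i]+old[i+1]) % 101
def fStep (xs : List Int) : List Int :=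
  (PySem.List.pyRange 0 ((xs.length : Int) - 1) 1).foldl
    (fun acc i =>
      acc ++ [PySem.Int.mod (PySem.List.pyGetD xs i 0 + PySem.List.pyGetD xs (i + 1) 0) 101]) []

-- A's while-loop; fuel = initial length suffices (each pass shortens the list by 1)
def fLoop : Nat → List Int → List Int
  | 0, xs => xs
  | fuel + 1, xs => if xs.length ≠ 1 then fLoop fuel (fStep xs) else xs

-- old_list[0]: pyGetD exact under Pre_f (li ≠ [], so the loop ends with one element)
def f (li : List Int) : Int := PySem.List.pyGetD (fLoop li.length li) 0 0

-- ===== PORT B =====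
def f_alt (li : List Int) : Int :=
  let n : Int := (li.length : Int)
  if li.length = 1 then li.headD 0
  else
    PySem.Int.mod
      (((PySem.List.enumerate li 0).foldl
        (fun (st : Int × Int) kx =>
          (st.1 + st.2 * kx.2, PySem.Int.floordiv (st.2 * (n - 1 - kx.1)) (kx.1 + 1)))
        (0, 1)).1) 101

-- ===== PRECONDITION & SPEC =====
-- Pre_f excludes the empty list, on which A's while-loop never terminates (no return).
def Pre_f (li : List Int) : Prop := li ≠ []
instance (li : List Int) : Decidable (Pre_f li) := by unfold Pre_f; infer_instance

def pvWitness_f : List Int := [1, 2, 3]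

def Spec_f (li : List Int) (out : Int) : Prop := out = f_alt li
instance (li : List Int) (out : Int) : Decidable (Spec_f li out) := by unfold Spec_f; infer_instance

-- ===== CLAIM (what is proved, stated in full; the proofs are below) =====
def Claim_equal_f : Prop := ∀ (li : List Int), Dom_f li → Pre_f li → Spec_f li (f li)

-- ===== LEMMAS AND PROOFS =====

-- structural versions of one adjacent-sum pass: with and without the % 101
def adjm : List Int → List Int
  | x :: y :: t => PySem.Int.mod (x + y) 101 :: adjm (y :: t)
  | _ => []

def adjp : List Int → List Int
  | x :: y :: t => (x + y) :: adjp (y :: t)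
  | _ => []

-- dotc m k xs = sum over j of C(m, k+j) * xs[j]
def dotc (m : Nat) : Nat → List Int → Int
  | _, [] => 0
  | k, x :: xs => (Nat.choose m k : Int) * x + dotc m (k + 1) xs

lemma fStep_eq_range (xs : List Int) :
    fStep xs = (List.range (xs.length - 1)).map
      (fun k => PySem.Int.mod (xs.getD k 0 + xs.getD (k + 1) 0) 101) := by
  unfold fStep
  rw [PySem.List.foldl_append_singleton_eq_map, PySem.List.pyRange_one, List.map_map]
  have h : (((xs.length : Int) - 1) - 0).toNat = xs.length - 1 := by omega
  rw [h]
  apply List.map_congr_left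
  intro k _
  simp only [Function.comp_apply]
  have h2 : (0 : Int) + (k : Int) + 1 = ((k + 1 : Nat) : Int) := by omega
  have h1 : (0 : Int) + (k : Int) = ((k : Nat) : Int) := by omega
  rw [h2, h1]
  simp only [PySem.List.pyGetD_natCast]

lemma fStep_eq (xs : List Int) : fStep xs = adjm xs := by
  rw [fStep_eq_range]
  induction xs with
  | nil => simp [adjm]
  | cons x rest ih =>
    cases rest with
    | nil => simp [adjm]
    | cons y t =>
      have hlen : (x :: y :: t).length - 1 = (t.length + 1) := by simp
      rw [hlen, List.range_succ_eq_map, List.map_cons, List.map_map]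
      have htail : (List.range t.length).map
          ((fun k => PySem.Int.mod ((x :: y :: t).getD k 0 + (x :: y :: t).getD (k + 1) 0) 101)
            ∘ Nat.succ)
          = adjm (y :: t) := by
        have hlen2 : (y :: t).length - 1 = t.length := by simp
        rw [hlen2] at ih
        rw [← ih]
        apply List.map_congr_left
        intro k _
        simp [Function.comp]
      rw [htail]
      show PySem.Int.mod (x + y) 101 :: adjm (y :: t) = adjm (x :: y :: t)
      rfl

lemma adjm_length (xs : List Int) : (adjm xs).length = xs.length - 1 := by
  induction xs with
  | nil => simp [adjm]
  | cons x rest ih =>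
    cases rest with
    | nil => simp [adjm]
    | cons y t => simp only [adjm, List.length_cons] at ih ⊢; omega

lemma mod101_cong (a : Int) : Int.ModEq 101 (PySem.Int.mod a 101) a := by
  rw [PySem.Int.mod_eq_emod_of_pos (by norm_num)]
  show (a % 101) % 101 = a % 101
  exact Int.emod_emod_of_dvd a dvd_rfl

lemma dotc_mod_cong (m : Nat) (xs : List Int) :
    ∀ k, Int.ModEq 101 (dotc m k (adjm xs)) (dotc m k (adjp xs)) := by
  induction xs with
  | nil => intro k; simp [adjm, adjp]
  | cons x rest ih =>
    cases rest with
    | nil => intro k; simp [adjm, adjp]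
    | cons y t =>
      intro k
      show Int.ModEq 101 (dotc m k (PySem.Int.mod (x + y) 101 :: adjm (y :: t)))
        (dotc m k ((x + y) :: adjp (y :: t)))
      simp only [dotc]
      exact Int.ModEq.add (Int.ModEq.mul_left _ (mod101_cong _)) (ih (k + 1))

-- Pascal step away from the left edge: the coefficient C(m,k) of the dropped head is compensated
lemma dotc_adjp_succ (m : Nat) :
    ∀ (t : List Int) (y x : Int) (k : Nat), (k + 1) + (x :: y :: t).length = m + 2 →
    dotc m (k + 1) (adjp (x :: y :: t)) + (Nat.choose m k : Int) * x
      = dotc (m + 1) (k + 1) (x :: y :: t) := by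
  intro t
  induction t with
  | nil =>
    intro y x k hk
    have hm : m = k + 1 := by simp at hk; omega
    subst hm
    simp [adjp, dotc, Nat.choose_self, Nat.choose_succ_self_right]
    ring
  | cons z t' ih =>
    intro y x k hk
    have hk' : (k + 1 + 1) + (y :: z :: t').length = m + 2 := by
      simp at hk ⊢; omega
    have ihy := ih z y (k + 1) hk'
    show dotc m (k + 1) ((x + y) :: adjp (y :: z :: t')) + (Nat.choose m k : Int) * x
      = dotc (m + 1) (k + 1) (x :: y :: z :: t')
    simp only [dotc] at ihy ⊢
    have hp : ((m + 1).choose (k + 1) : Int) = (m.choose k : Int) + (m.choose (k + 1) : Int) := by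
      rw [Nat.choose_succ_succ]; push_cast; ring
    rw [hp]
    linarith [ihy]

lemma dotc_adjp_zero (xs : List Int) (m : Nat) (h : xs.length = m + 2) :
    dotc m 0 (adjp xs) = dotc (m + 1) 0 xs := by
  match xs with
  | x :: y :: t =>
    cases t with
    | nil =>
      have hm : m = 0 := by simp at h; omega
      subst hm
      show dotc 0 0 ((x + y) :: adjp (y :: [])) = dotc 1 0 (x :: y :: [])
      simp [adjp, dotc]
    | cons z t' =>
      have h1 : (0 + 1) + (y :: z :: t').length = m + 2 := by simp at h ⊢; omega
      have hstep := dotc_adjp_succ m t' z y 0 h1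
      show dotc m 0 ((x + y) :: adjp (y :: z :: t')) = dotc (m + 1) 0 (x :: y :: z :: t')
      simp only [dotc] at hstep ⊢
      simp only [Nat.choose_zero_right] at hstep ⊢
      push_cast at hstep ⊢
      linarith [hstep]

lemma fLoop_singleton (fuel : Nat) (v : Int) : fLoop fuel [v] = [v] := by
  cases fuel <;> simp [fLoop]

lemma loop_spec : ∀ (n : Nat) (xs : List Int), xs.length = n + 2 →
    ∀ fuel, n + 1 ≤ fuel →
    ∃ v, fLoop fuel xs = [v] ∧ Int.ModEq 101 v (dotc (n + 1) 0 xs) ∧ 0 ≤ v ∧ v < 101 := by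
  intro n
  induction n with
  | zero =>
    intro xs hlen fuel hfuel
    match xs, hlen with
    | [x, y], _ =>
      obtain ⟨fu, rfl⟩ : ∃ fu, fuel = fu + 1 := ⟨fuel - 1, by omega⟩
      refine ⟨PySem.Int.mod (x + y) 101, ?_, ?_, ?_, ?_⟩
      · show fLoop (fu + 1) [x, y] = _
        rw [fLoop]
        simp only [List.length_cons, List.length_nil]
        rw [if_pos (by omega), fStep_eq]
        show fLoop fu [PySem.Int.mod (x + y) 101] = _
        exact fLoop_singleton fu _
      · have hd : dotc 1 0 [x, y] = x + y := by simp [dotc]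
        rw [hd]; exact mod101_cong _
      · exact PySem.Int.mod_nonneg _ (by norm_num)
      · exact PySem.Int.mod_lt _ (by norm_num)
  | succ n ih =>
    intro xs hlen fuel hfuel
    obtain ⟨fu, rfl⟩ : ∃ fu, fuel = fu + 1 := ⟨fuel - 1, by omega⟩
    have hstep : (adjm xs).length = (n + 2) := by rw [adjm_length]; omega
    obtain ⟨v, hv, hcong, h0, h1⟩ := ih (adjm xs) hstep fu (by omega)
    refine ⟨v, ?_, ?_, h0, h1⟩
    · rw [fLoop, if_pos (by omega), fStep_eq]
      exact hv
    · refine hcong.trans ?_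
      refine (dotc_mod_cong (n + 1) xs 0).trans ?_
      rw [dotc_adjp_zero xs (n + 1) hlen]

-- B's fold maintains (partial weighted sum, exact binomial C(m, k))
lemma bfold (m : Nat) : ∀ (xs : List Int) (k : Nat) (t : Int),
    (PySem.List.enumerate xs (k : Int)).foldl
      (fun (st : Int × Int) kx =>
        (st.1 + st.2 * kx.2, PySem.Int.floordiv (st.2 * ((m : Int) - kx.1)) (kx.1 + 1)))
      (t, (Nat.choose m k : Int))
    = (t + dotc m k xs, (Nat.choose m (k + xs.length) : Int)) := by
  intro xs
  induction xs with
  | nil => intro k t; simp [PySem.List.enumerate_nil, dotc]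
  | cons x rest ih =>
    intro k t
    rw [PySem.List.enumerate_cons, List.foldl_cons]
    have hdiv : PySem.Int.floordiv ((Nat.choose m k : Int) * ((m : Int) - (k : Int))) ((k : Int) + 1)
        = (Nat.choose m (k + 1) : Int) := by
      by_cases hkm : k ≤ m
      · have hsub : (m : Int) - (k : Int) = ((m - k : Nat) : Int) := by omega
        have hch : Nat.choose m k * (m - k) = Nat.choose m (k + 1) * (k + 1) :=
          (Nat.choose_succ_right_eq m k).symm
        rw [hsub]
        have hmm : ((Nat.choose m k : Nat) : Int) * ((m - k : Nat) : Int)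
            = ((Nat.choose m (k + 1) * (k + 1) : Nat) : Int) := by
          push_cast [← hch]; ring
        rw [hmm]
        have h1 : ((k : Int) + 1) = (((k + 1 : Nat)) : Int) := by push_cast; ring
        rw [h1, PySem.Int.floordiv_natCast]
        norm_cast
        exact Nat.mul_div_cancel _ (by omega)
      · have hz : Nat.choose m k = 0 := Nat.choose_eq_zero_of_lt (by omega)
        have hz' : Nat.choose m (k + 1) = 0 := Nat.choose_eq_zero_of_lt (by omega)
        rw [hz, hz']
        rw [PySem.Int.floordiv_eq_ediv_of_pos (by positivity)]
        simp
    have hcast : ((k : Int) + 1) = (((k + 1 : Nat)) : Int) := by push_cast; ring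
    simp only [hdiv]
    rw [hcast, ih (k + 1) (t + (Nat.choose m k : Int) * x)]
    simp only [Prod.mk.injEq]
    constructor
    · show t + (Nat.choose m k : Int) * x + dotc m (k + 1) rest = t + dotc m k (x :: rest)
      simp only [dotc]; ring
    · congr 2
      simp only [List.length_cons]; omega

lemma falt_eq (x y : Int) (t : List Int) :
    f_alt (x :: y :: t) = PySem.Int.mod (dotc (t.length + 1) 0 (x :: y :: t)) 101 := by
  unfold f_alt
  rw [if_neg (by simp)]
  have hfun : (fun (st : Int × Int) (kx : Int × Int) =>
        (st.1 + st.2 * kx.2,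
          PySem.Int.floordiv (st.2 * (((x :: y :: t).length : Int) - 1 - kx.1)) (kx.1 + 1)))
      = (fun (st : Int × Int) (kx : Int × Int) =>
        (st.1 + st.2 * kx.2,
          PySem.Int.floordiv (st.2 * (((t.length + 1 : Nat) : Int) - kx.1)) (kx.1 + 1))) := by
    funext st kx
    simp only [List.length_cons]
    congr 2
    push_cast
    ring
  rw [hfun]
  have hb := bfold (t.length + 1) (x :: y :: t) 0 0
  simp only [Nat.cast_zero, Nat.choose_zero_right, Nat.cast_one] at hb
  rw [hb]
  simp

lemma fA_eq (x y : Int) (t : List Int) :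
    f (x :: y :: t) = PySem.Int.mod (dotc (t.length + 1) 0 (x :: y :: t)) 101 := by
  have hlen : (x :: y :: t).length = t.length + 2 := by simp
  obtain ⟨v, hv, hcong, h0, h1⟩ :=
    loop_spec t.length (x :: y :: t) hlen (t.length + 2) (by omega)
  unfold f
  rw [hlen, hv]
  rw [PySem.List.pyGetD_zero_cons]
  rw [PySem.Int.mod_eq_emod_of_pos (by norm_num)]
  exact (Int.emod_eq_of_lt h0 h1).symm.trans hcong

-- ===== VERDICT (by name: the statement is the Claim_ definition above) =====
theorem f_spec : Claim_equal_f := by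
  intro li _ hpre
  unfold Spec_f
  match li with
  | [] => exact absurd rfl hpre
  | [x] =>
    show f [x] = f_alt [x]
    unfold f f_alt fLoop
    simp [PySem.List.pyGetD_zero_cons]
  | x :: y :: t => rw [fA_eq, falt_eq]
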